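-- pv_equiv track=rewrite | github.com/Emieeel/auto_oo | src/auto_oo/ansatz/uccd.py | generalized_pair_doubles
-- ===== SOURCE A (Python) =====
-- def generalized_pair_doubles(wires):
--     r"""Return pair coupled-cluster double excitations
--
--     .. math::
--         \hat{T_2} = \sum_{pq} t_{p_\alpha p_\beta}^{q_\alpha, q_\beta}
--                \hat{c}^{\dagger}_{q_\alpha} \hat{c}^{\dagger}_{q_\beta} \hat{c}_{p_\beta} \hat{c}_{p_\alpha}
--
--     """
--     pair_gen_doubles_wires = [
--         [
--             wires[r : r + 2],
--             wires[p : p + 2],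
--         ]  # wires for [wires[r], wires[r+1], wires[p], wires[p+1]] terms
--         for r in range(0, len(wires) - 1, 2)
--         for p in range(0, len(wires) - 1, 2)
--         if p != r  # remove redundant terms
--     ]
--     return pair_gen_doubles_wires
-- ===== SOURCE B (Python) =====
-- def generalized_pair_doubles(wires):
--     # Closed-form enumeration: there are m = len(wires)//2 even-aligned two-wire
--     # slices, hence m*(m-1) ordered pairs.  A single flat loop decodes each flat
--     # index k into the pair of slice positions (i, j) arithmetically:
--     # i = k // (m-1), and j skips over i.  No nested loops, no inequality guard.
--     m = len(wires) // 2
--     out = []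
--     for k in range(m * (m - 1)):
--         i, j = divmod(k, m - 1)
--         if j >= i:
--             j += 1
--         out.append([wires[2 * i : 2 * i + 2], wires[2 * j : 2 * j + 2]])
--     return out
-- ===== Notes on version B (the rewrite author's own statement) =====
-- stated objective: alternative
-- what changed: Replaces A's fused double loop with an inequality guard by a single flat loop over the m*(m-1) pair indices (m = len(wires)//2), arithmetically decoding each flat index k with divmod(k, m-1) into the two slice positions and skipping the diagonal by the j >= i shift, so there is no nested loop and no guard.
import Mathlib
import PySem

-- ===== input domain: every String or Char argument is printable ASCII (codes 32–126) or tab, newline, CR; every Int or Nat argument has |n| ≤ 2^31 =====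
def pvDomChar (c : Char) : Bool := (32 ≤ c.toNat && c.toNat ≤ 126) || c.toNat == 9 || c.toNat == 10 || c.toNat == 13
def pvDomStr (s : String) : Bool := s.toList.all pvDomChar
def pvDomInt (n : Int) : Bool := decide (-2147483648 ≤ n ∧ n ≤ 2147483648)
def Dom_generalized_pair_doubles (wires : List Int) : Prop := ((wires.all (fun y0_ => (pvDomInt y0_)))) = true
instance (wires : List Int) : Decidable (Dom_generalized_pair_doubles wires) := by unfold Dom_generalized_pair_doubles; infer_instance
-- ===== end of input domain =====

-- B replaces A's nested slice-loops with an inequality guard by one flat loop over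
-- the m*(m-1) pair indices, decoding each index with divmod into the two slice
-- positions (objective: alternative decomposition; same return value).

-- ===== PORT A =====
def generalized_pair_doubles (wires : List Int) : List (List (List Int)) :=
  (PySem.List.pyRange 0 (PySem.List.len wires - 1) 2).flatMap (fun r =>
    (PySem.List.pyRange 0 (PySem.List.len wires - 1) 2).flatMap (fun p =>
      if p ≠ r then
        [[PySem.List.slice wires (some r) (some (r + 2)),
          PySem.List.slice wires (some p) (some (p + 2))]]
      else []))

-- ===== PORT B =====
-- divmod(k, m-1) in Source B is ported with the total floordiv/mod: the loop body
-- only runs when m ≥ 2 (range m*(m-1) nonempty), so m-1 ≠ 0 there, exactly as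
-- in Python where divmod never sees a zero divisor.
def generalized_pair_doubles_alt (wires : List Int) : List (List (List Int)) :=
  let m : Int := PySem.Int.floordiv (PySem.List.len wires) 2
  (PySem.List.pyRange 0 (m * (m - 1)) 1).foldl (fun out k =>
    let i := PySem.Int.floordiv k (m - 1)
    let j0 := PySem.Int.mod k (m - 1)
    let j := if j0 ≥ i then j0 + 1 else j0
    out ++ [[PySem.List.slice wires (some (2 * i)) (some (2 * i + 2)),
             PySem.List.slice wires (some (2 * j)) (some (2 * j + 2))]]) []

-- ===== PRECONDITION & SPEC =====
def Spec_generalized_pair_doubles (wires : List Int) (out : List (List (List Int))) : Prop := out = generalized_pair_doubles_alt wires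
instance (wires : List Int) (out : List (List (List Int))) : Decidable (Spec_generalized_pair_doubles wires out) := by unfold Spec_generalized_pair_doubles; infer_instance

-- ===== CLAIM =====
def Claim_equal_generalized_pair_doubles : Prop := ∀ (wires : List Int), Dom_generalized_pair_doubles wires → Spec_generalized_pair_doubles wires (generalized_pair_doubles wires)

-- ===== LEMMAS AND PROOFS =====

-- guarded singleton comprehension = filter-then-map
lemma pv_flatMap_guard {α β : Type} (l : List α) (q : α → Prop) [DecidablePred q] (g : α → β) :
    l.flatMap (fun p => if q p then [g p] else [])
      = (l.filter (fun p => q p)).map g := by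
  induction l with
  | nil => rfl
  | cons y xs ih =>
    rw [List.flatMap_cons, List.filter_cons, ih]
    by_cases h : q y <;> simp [h]

-- a flat range of a*b split into a blocks of b
lemma pv_range_mul {β : Type} (a b : Nat) (f : Nat → β) :
    (List.range (a * b)).map f
      = (List.range a).flatMap (fun i => (List.range b).map (fun j => f (i * b + j))) := by
  induction a with
  | zero => simp
  | succ a ih =>
    rw [Nat.succ_mul, List.range_add, List.map_append, ih, List.range_succ,
        List.flatMap_append, List.map_map]
    simp [Function.comp_def, Nat.add_comm]

-- skipping index i by the j ≥ i shift = filtering i out of the index range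
lemma pv_skip_aux {β : Type} (i d : Nat) (h : Nat → β) :
    (List.range (i + d)).map (fun j => h (if i ≤ j then j + 1 else j))
      = ((List.range (i + d + 1)).filter (fun p => p ≠ i)).map h := by
  have h2 : i + d + 1 = (i + 1) + d := by omega
  rw [List.range_add, h2, List.range_add, List.range_succ, List.filter_append,
      List.map_append, List.map_append]
  congr 1
  · rw [List.filter_append, List.filter_eq_self.mpr, List.filter_cons, List.filter_nil]
    · simp only [ne_eq, not_true_eq_false, decide_false, Bool.false_eq_true, if_false,
                 List.append_nil]
      apply List.map_congr_left
      intro j hj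
      rw [List.mem_range] at hj
      have hij : ¬ i ≤ j := by omega
      simp [hij]
    · intro x hx
      rw [List.mem_range] at hx
      simp only [ne_eq, decide_eq_true_eq]
      omega
  · rw [List.filter_eq_self.mpr, List.map_map, List.map_map]
    · apply List.map_congr_left
      intro j _
      have hij : i ≤ i + j := Nat.le_add_right i j
      simp only [Function.comp_apply, hij, if_pos]
      congr 1
      omega
    · intro x hx
      rw [List.mem_map] at hx
      obtain ⟨y, _, rfl⟩ := hx
      simp only [ne_eq, decide_eq_true_eq]
      omega

lemma pv_skip {β : Type} (M i : Nat) (hi : i < M) (h : Nat → β) :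
    (List.range (M - 1)).map (fun j => h (if i ≤ j then j + 1 else j))
      = ((List.range M).filter (fun p => p ≠ i)).map h := by
  have h1 : M - 1 = i + (M - 1 - i) := by omega
  have h2 : M = i + (M - 1 - i) + 1 := by omega
  rw [h1]
  conv_rhs => rw [h2]
  exact pv_skip_aux i (M - 1 - i) h

-- toNat of the Int pair count is the Nat pair count
lemma pv_toNat_mul (M : Nat) : ((M : Int) * ((M : Int) - 1)).toNat = M * (M - 1) := by
  cases M with
  | zero => simp
  | succ k =>
    have h : ((k + 1 : Nat) : Int) * (((k + 1 : Nat) : Int) - 1) = (((k + 1) * k : Nat) : Int) := by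
      push_cast; ring
    rw [h, Int.toNat_natCast, Nat.succ_sub_one]

-- the even-aligned slice-start range of A equals casts of 2·(range (n/2))
lemma pv_rangeA (n : Nat) :
    PySem.List.pyRange 0 ((n : Int) - 1) 2
      = (List.range (n / 2)).map (fun t => ((2 * t : Nat) : Int)) := by
  rw [PySem.List.pyRange_of_pos _ _ (by norm_num : (0:Int) < 2)]
  have hcount : (if (0:Int) < (n:Int) - 1 then (((n:Int) - 1 - 0 + 2 - 1) / 2).toNat else 0) = n / 2 := by
    split_ifs with h
    · have he : ((n:Int) - 1 - 0 + 2 - 1) = (n : Int) := by ring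
      rw [he]
      omega
    · omega
  rw [hcount]
  apply List.map_congr_left
  intro t _
  push_cast
  ring

-- ===== VERDICT =====
theorem generalized_pair_doubles_spec : Claim_equal_generalized_pair_doubles := by
  intro wires _
  unfold Spec_generalized_pair_doubles generalized_pair_doubles generalized_pair_doubles_alt
  have hm : PySem.Int.floordiv ((wires.length : Int)) 2 = ((wires.length / 2 : Nat) : Int) :=
    PySem.Int.floordiv_natCast wires.length 2
  simp only [PySem.List.len_eq]
  rw [pv_rangeA wires.length, hm, PySem.List.foldl_append_singleton_eq_map, List.nil_append,
      PySem.List.pyRange_one, List.map_map]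
  simp only [Int.sub_zero, pv_toNat_mul, zero_add]
  rw [pv_range_mul (wires.length / 2) (wires.length / 2 - 1)]
  generalize wires.length / 2 = M
  rw [List.flatMap_map]
  apply List.flatMap_congr
  intro i hi
  rw [List.mem_range] at hi
  rw [List.flatMap_map]
  rw [pv_flatMap_guard (List.range M) (fun p => ((2 * p : Nat) : Int) ≠ ((2 * i : Nat) : Int))
      (fun p => [PySem.List.slice wires (some ((2 * i : Nat) : Int)) (some (((2 * i : Nat) : Int) + 2)),
                 PySem.List.slice wires (some ((2 * p : Nat) : Int)) (some (((2 * p : Nat) : Int) + 2))])]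
  have hfil : (List.range M).filter (fun p => ((2 * p : Nat) : Int) ≠ ((2 * i : Nat) : Int))
      = (List.range M).filter (fun p => p ≠ i) := by
    apply List.filter_congr
    intro p _
    simp only [ne_eq, decide_eq_decide, Nat.cast_inj]
    omega
  rw [hfil, ← pv_skip M i hi]
  apply List.map_congr_left
  intro j hj
  rw [List.mem_range] at hj
  have hM2 : 2 ≤ M := by omega
  have hMm1 : ((M : Int) - 1) = ((M - 1 : Nat) : Int) := by omega
  have hdiv : PySem.Int.floordiv (((i * (M - 1) + j : Nat) : Int)) ((M : Int) - 1) = (i : Int) := by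
    rw [hMm1, PySem.Int.floordiv_natCast]
    congr 1
    rw [Nat.mul_comm i (M - 1), Nat.mul_add_div (by omega : 0 < M - 1),
        Nat.div_eq_of_lt hj, Nat.add_zero]
  have hmod : PySem.Int.mod (((i * (M - 1) + j : Nat) : Int)) ((M : Int) - 1) = (j : Int) := by
    rw [hMm1, PySem.Int.mod_natCast]
    congr 1
    rw [Nat.mul_comm i (M - 1), Nat.mul_add_mod, Nat.mod_eq_of_lt hj]
  show _ = [PySem.List.slice wires _ _, PySem.List.slice wires _ _]
  rw [hdiv, hmod]
  by_cases hij : i ≤ j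
  · have hge : ((j : Int) ≥ (i : Int)) := by exact_mod_cast hij
    simp only [hij, if_pos, hge]
    push_cast
    ring_nf
  · have hge : ¬ ((j : Int) ≥ (i : Int)) := by exact_mod_cast hij
    simp only [hij, hge, if_false]
    push_cast
    ring_nf
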